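-- pv_equiv track=rewrite | github.com/etaxbrianporter-dot/informational-asymmetry | code/Matching_extractor_v2.py | find_best_generator
-- ===== SOURCE A (Python) =====
-- def compute_dir_perm(p, g=2):
--     """Compute the permutation of direction classes induced by ×g mod p.
--
--     Direction classes are 0-indexed: class k = edges with diff (k+1).
--     Diff d and diff (p-d) are the same direction class.
--
--     ×g sends diff d → diff (g*d mod p), identifying d with p-d.
--
--     Returns:
--       perm: dict mapping dir class → dir class
--       orbits: list of direction class orbits
--       cycle_structure: list of orbit lengths
--     """
--     n_dirs = (p - 1) // 2
--
--     def unsigned_dir(d):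
--         """Map a nonzero residue mod p to its direction class (0-indexed)."""
--         d_mod = d % p
--         if d_mod == 0:
--             return None
--         d_unsigned = min(d_mod, p - d_mod)
--         return d_unsigned - 1  # 0-indexed
--
--     # Compute permutation
--     perm = {}
--     for k in range(n_dirs):
--         diff = k + 1  # direction class k has diff (k+1)
--         new_diff = (g * diff) % p
--         new_class = unsigned_dir(new_diff)
--         if new_class is None:
--             return None, [], []  # ×g sends a direction to 0 mod p (composite p)
--         perm[k] = new_class
--
--     # Check it's actually a permutation (injective on n_dirs classes)
--     if len(set(perm.values())) != n_dirs:
--         return None, [], []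
--
--     # Compute orbits
--     visited = set()
--     orbits = []
--     for k in range(n_dirs):
--         if k in visited:
--             continue
--         orbit = []
--         current = k
--         while current not in visited:
--             visited.add(current)
--             orbit.append(current)
--             current = perm[current]
--         orbits.append(orbit)
--
--     return perm, orbits, [len(o) for o in orbits]
--
-- def find_best_generator(p):
--     """Find generator g giving longest orbits on direction classes.
--     For prime p, ×g is always a valid permutation (no zero images).
--     For composite p, some g values are invalid."""
--     n_dirs = (p - 1) // 2
--     best_g = 2
--     best_max_orbit = 0
--
--     for g in range(2, p):
--         perm, orbits, lengths = compute_dir_perm(p, g)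
--         if perm is None:
--             continue  # invalid for this g
--         max_len = max(lengths) if lengths else 0
--         if max_len > best_max_orbit:
--             best_max_orbit = max_len
--             best_g = g
--             if max_len == n_dirs:
--                 break  # found a full cycle
--
--     return best_g, best_max_orbit
-- ===== SOURCE B (Python) =====
-- def _gcd(a, b):
--     while b:
--         a, b = b, a % b
--     return a
--
-- def find_best_generator(p):
--     """Find generator g giving longest orbits on direction classes.
--
--     Same search over g, but instead of building the direction-class permutation
--     and decomposing it into orbits (O(p) work per g), use that for g coprime to
--     p the longest orbit length equals the least l >= 1 with g**l == +-1 (mod p)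
--     (the multiplicative order of g in (Z/p)*/{+-1}); for g not coprime to p the
--     permutation is invalid, so skip it."""
--     n_dirs = (p - 1) // 2
--     best_g, best_len = 2, 0
--     for g in range(2, p):
--         if _gcd(g, p) != 1:
--             continue
--         x, l = g % p, 1
--         while x != 1 and x != p - 1:
--             x = x * g % p
--             l += 1
--         if l > best_len:
--             best_g, best_len = g, l
--             if l == n_dirs:
--                 break
--     return best_g, best_len
-- ===== Notes on version B (the rewrite author's own statement) =====
-- stated objective: faster
-- what changed: Instead of building the full direction-class permutation and decomposing it into orbits for every candidate g (O(p) work per g), B skips g with gcd(g,p)>1 and computes the longest orbit as the least l>=1 with g^l = +-1 (mod p), i.e. the order of g in (Z/p)*/{+-1}, by iterating x = x*g % p from x = g.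
-- outside the precondition, e.g. on find_best_generator(4): A raises KeyError, B returns (3, 1)
import Mathlib
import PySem

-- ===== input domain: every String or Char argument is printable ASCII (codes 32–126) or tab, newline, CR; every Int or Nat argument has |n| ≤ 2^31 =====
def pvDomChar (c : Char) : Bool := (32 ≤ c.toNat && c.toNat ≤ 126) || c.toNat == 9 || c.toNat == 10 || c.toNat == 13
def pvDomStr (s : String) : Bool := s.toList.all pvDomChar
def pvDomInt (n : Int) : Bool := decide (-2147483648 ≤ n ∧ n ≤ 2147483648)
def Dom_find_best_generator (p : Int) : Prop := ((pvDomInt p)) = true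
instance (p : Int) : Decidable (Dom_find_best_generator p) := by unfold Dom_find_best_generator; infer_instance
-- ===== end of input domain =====

-- B replaces A's per-g permutation build + orbit decomposition by the order of g in (Z/p)*/{±1}
-- (least l ≥ 1 with g^l ≡ ±1 mod p), skipping g with gcd(g,p) ≠ 1; objective: faster.

-- ===== PORT A =====

-- unsigned_dir (inner helper of compute_dir_perm)
def pvUnsignedDir (p d : Int) : Option Int :=
  let d_mod := PySem.Int.mod d p
  if d_mod = 0 then none
  else some (min d_mod (p - d_mod) - 1)

-- the 'for k in range(n_dirs)' loop building perm, with its early 'return None'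
def pvBuildPerm (p g : Int) : List Int → PySem.Dict Int Int → Option (PySem.Dict Int Int)
  | [], perm => some perm
  | k :: ks, perm =>
    match pvUnsignedDir p (PySem.Int.mod (g * (k + 1)) p) with
    | none => none
    | some c => pvBuildPerm p g ks (perm.insert k c)

-- the 'while current not in visited' loop; fuel makes it structural (Python's loop, inside
-- Pre_, revisits its start within n_dirs steps, so the fuel below is never exhausted there;
-- 'perm[current]' is a dict lookup that succeeds inside Pre_, ported as getD)
def pvWalk (perm : PySem.Dict Int Int) : Nat → Int → PySem.Set Int → List Int → PySem.Set Int × List Int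
  | 0, _, visited, orbit => (visited, orbit)
  | fuel + 1, current, visited, orbit =>
    if PySem.Set.contains visited current then (visited, orbit)
    else pvWalk perm fuel (perm.getD current 0) (PySem.Set.add visited current) (orbit ++ [current])

-- the 'for k in range(n_dirs)' loop collecting orbits
def pvOrbitsLoop (perm : PySem.Dict Int Int) (fuel : Nat) : List Int → PySem.Set Int → List (List Int) → List (List Int)
  | [], _, orbits => orbits
  | k :: ks, visited, orbits =>
    if PySem.Set.contains visited k then pvOrbitsLoop perm fuel ks visited orbits
    else
      let r := pvWalk perm fuel k visited []
      pvOrbitsLoop perm fuel ks r.1 (orbits ++ [r.2])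

def compute_dir_perm (p g : Int) : Option (PySem.Dict Int Int) × List (List Int) × List Int :=
  let n_dirs := PySem.Int.floordiv (p - 1) 2
  match pvBuildPerm p g (PySem.List.pyRange 0 n_dirs 1) PySem.Dict.empty with
  | none => (none, [], [])
  | some perm =>
    if ((PySem.Set.ofList perm.values).length : Int) ≠ n_dirs then (none, [], [])
    else
      let orbits := pvOrbitsLoop perm (n_dirs.toNat + 2) (PySem.List.pyRange 0 n_dirs 1) PySem.Set.empty []
      (some perm, orbits, orbits.map (fun o => (o.length : Int)))

-- the 'for g in range(2, p)' loop with its break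
def pvALoop (p n_dirs : Int) : List Int → Int → Int → Int × Int
  | [], best_g, best_max => (best_g, best_max)
  | g :: gs, best_g, best_max =>
    match compute_dir_perm p g with
    | (none, _, _) => pvALoop p n_dirs gs best_g best_max
    | (some _, _, lengths) =>
      let max_len := match PySem.List.max? lengths (fun x => x) with
        | some m => m
        | none => 0
      if best_max < max_len then
        if max_len = n_dirs then (g, max_len)
        else pvALoop p n_dirs gs g max_len
      else pvALoop p n_dirs gs best_g best_max

def find_best_generator (p : Int) : Int × Int :=
  let n_dirs := PySem.Int.floordiv (p - 1) 2
  pvALoop p n_dirs (PySem.List.pyRange 2 p 1) 2 0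

-- ===== PORT B =====

-- _gcd's 'while b: a, b = b, a % b' (its arguments are the nonnegative ints g, p here, so Nat is
-- exact); fuel makes it structural (b strictly decreases each step, so fuel b+1 is never exhausted)
def pvGcdLoop : Nat → Nat → Nat → Nat
  | 0, a, _ => a
  | fuel + 1, a, b => if b = 0 then a else pvGcdLoop fuel b (a % b)

-- the 'while x != 1 and x != p - 1' loop; fuel makes it structural (inside Pre_ the order
-- of g mod p is at most p, so the fuel below is never exhausted where the Python loop ends)
def pvOrderLoop (p g : Int) : Nat → Int → Int → Int
  | 0, _, l => l
  | fuel + 1, x, l =>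
    if x ≠ 1 ∧ x ≠ p - 1 then pvOrderLoop p g fuel (PySem.Int.mod (x * g) p) (l + 1)
    else l

-- the 'for g in range(2, p)' loop with its break
def pvBLoop (p n_dirs : Int) : List Int → Int → Int → Int × Int
  | [], best_g, best_len => (best_g, best_len)
  | g :: gs, best_g, best_len =>
    if pvGcdLoop (p.toNat + 1) g.toNat p.toNat ≠ 1 then pvBLoop p n_dirs gs best_g best_len
    else
      let l := pvOrderLoop p g (p.toNat + 1) (PySem.Int.mod g p) 1
      if best_len < l then
        if l = n_dirs then (g, l)
        else pvBLoop p n_dirs gs g l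
      else pvBLoop p n_dirs gs best_g best_len

def find_best_generator_alt (p : Int) : Int × Int :=
  pvBLoop p (PySem.Int.floordiv (p - 1) 2) (PySem.List.pyRange 2 p 1) 2 0

-- ===== PRECONDITION & SPEC =====

-- Pre_ excludes only p = 4, the single input on which Python A raises (KeyError: the unsigned
-- class p/2 - 1 escapes the class range, passes the size check, and the orbit walk looks it up).
def Pre_find_best_generator (p : Int) : Prop := p ≠ 4
instance (p : Int) : Decidable (Pre_find_best_generator p) := by unfold Pre_find_best_generator; infer_instance

def pvWitness_find_best_generator : Int := 7

def Spec_find_best_generator (p : Int) (out : Int × Int) : Prop := out = find_best_generator_alt p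
instance (p : Int) (out : Int × Int) : Decidable (Spec_find_best_generator p out) := by unfold Spec_find_best_generator; infer_instance

-- ===== CLAIM (what is proved, stated in full; the proofs are below) =====
def Claim_equal_find_best_generator : Prop := ∀ (p : Int), Dom_find_best_generator p → Pre_find_best_generator p → Spec_find_best_generator p (find_best_generator p)

-- ===== LEMMAS AND PROOFS =====

-- proof-side abbreviations: the unsigned-direction value and the class map, on plain Int emod
def pvU (p m : Int) : Int := min (m % p) (p - m % p)
def pvF (p g k : Int) : Int := pvU p (g * (k + 1)) - 1
-- the trajectory of class k under repeated ×g
def pvTraj (p g k : Int) (l : Nat) : Int := pvU p (g ^ l * (k + 1)) - 1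


-- proof-side name for A's n_dirs
def pvN (p : Int) : Int := PySem.Int.floordiv (p - 1) 2

theorem pvN_facts (p : Int) (hp : 3 ≤ p) :
    1 ≤ pvN p ∧ p - 2 ≤ 2 * pvN p ∧ 2 * pvN p ≤ p - 1 := by
  unfold pvN
  rw [PySem.Int.floordiv_eq_ediv_of_pos (by omega)]
  omega

-- a % p = r for the unique representative
theorem pvEmodEq (p a r : Int) (h : p ∣ a - r) (h0 : 0 ≤ r) (h1 : r < p) :
    a % p = r := by
  obtain ⟨q, hq⟩ := h
  have ha : a = r + p * q := by linarith
  rw [ha, Int.add_mul_emod_self_left, Int.emod_eq_of_lt h0 h1]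

theorem pvDvdSubEmod (p a : Int) : p ∣ a - a % p := ⟨a / p, by rw [Int.emod_def]; ring⟩

theorem pvU_bounds (p m : Int) (hp : 0 < p) (h : ¬ p ∣ m) :
    1 ≤ pvU p m ∧ 2 * pvU p m ≤ p := by
  have h1 : 0 ≤ m % p := Int.emod_nonneg m (by omega)
  have h2 : m % p < p := Int.emod_lt_of_pos m hp
  have h0 : m % p ≠ 0 := fun h0 => h (Int.dvd_of_emod_eq_zero h0)
  unfold pvU
  omega

theorem pvU_id (p d : Int) (h1 : 1 ≤ d) (h2 : 2 * d < p) : pvU p d = d := by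
  unfold pvU
  rw [Int.emod_eq_of_lt (by omega) (by omega)]
  omega

theorem pvU_congr (p m m' : Int) (hp : 0 < p) (hm : ¬ p ∣ m)
    (h : p ∣ m - m' ∨ p ∣ m + m') : pvU p m = pvU p m' := by
  have hdm := pvDvdSubEmod p m
  have hdm' := pvDvdSubEmod p m'
  have h1 : 0 ≤ m % p := Int.emod_nonneg m (by omega)
  have h2 : m % p < p := Int.emod_lt_of_pos m hp
  have h1' : 0 ≤ m' % p := Int.emod_nonneg m' (by omega)
  have h2' : m' % p < p := Int.emod_lt_of_pos m' hp
  have h0 : m % p ≠ 0 := fun h0 => hm (Int.dvd_of_emod_eq_zero h0)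
  rcases h with h | h
  · have hd : p ∣ m % p - m' % p := by
      have := dvd_add (dvd_sub h hdm) hdm'
      have he : m - m' - (m - m % p) + (m' - m' % p) = m % p - m' % p := by ring
      rwa [he] at this
    have : m % p - m' % p = 0 := Int.eq_zero_of_abs_lt_dvd hd (by rw [abs_lt]; omega)
    unfold pvU
    omega
  · have h0' : m' % p ≠ 0 := by
      intro h0'
      have hpm' : p ∣ m' := Int.dvd_of_emod_eq_zero h0'
      exact hm (by have := dvd_sub h hpm'; simpa using this)
    have hd : p ∣ m % p + m' % p - p := by
      have := dvd_sub (dvd_sub h hdm) hdm'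
      have he : m + m' - (m - m % p) - (m' - m' % p) = m % p + m' % p := by ring
      rw [he] at this
      exact dvd_sub this dvd_rfl
    have : m % p + m' % p - p = 0 := Int.eq_zero_of_abs_lt_dvd hd (by rw [abs_lt]; omega)
    unfold pvU
    omega

theorem pvU_eq_imp (p m m' : Int) (hp : 0 < p) (hm : ¬ p ∣ m) (hm' : ¬ p ∣ m')
    (h : pvU p m = pvU p m') : p ∣ m - m' ∨ p ∣ m + m' := by
  have hdm := pvDvdSubEmod p m
  have hdm' := pvDvdSubEmod p m'
  have h1 : 0 ≤ m % p := Int.emod_nonneg m (by omega)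
  have h2 : m % p < p := Int.emod_lt_of_pos m hp
  have h1' : 0 ≤ m' % p := Int.emod_nonneg m' (by omega)
  have h2' : m' % p < p := Int.emod_lt_of_pos m' hp
  have h0 : m % p ≠ 0 := fun h0 => hm (Int.dvd_of_emod_eq_zero h0)
  have h0' : m' % p ≠ 0 := fun h0 => hm' (Int.dvd_of_emod_eq_zero h0)
  unfold pvU at h
  have hcase : m % p = m' % p ∨ m % p + m' % p = p := by omega
  rcases hcase with hc | hc
  · left
    have : m - m' = (m - m % p) - (m' - m' % p) := by omega
    rw [this]
    exact dvd_sub hdm hdm'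
  · right
    have : m + m' = (m - m % p) + (m' - m' % p) + p := by omega
    rw [this]
    exact dvd_add (dvd_add hdm hdm') dvd_rfl

theorem pvCancel (p g x : Int) (hg : Int.gcd g p = 1) (h : p ∣ g * x) : p ∣ x := by
  have hc : IsCoprime (p : Int) g := Int.isCoprime_iff_gcd_eq_one.mpr (by rwa [Int.gcd_comm])
  exact hc.dvd_of_dvd_mul_left h

theorem pvCancelPow (p g x : Int) (l : Nat) (hg : Int.gcd g p = 1) (h : p ∣ g ^ l * x) :
    p ∣ x := by
  have hc : IsCoprime (p : Int) (g ^ l) :=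
    (Int.isCoprime_iff_gcd_eq_one.mpr (by rwa [Int.gcd_comm])).pow_right
  exact hc.dvd_of_dvd_mul_left h


theorem pvTraj_zero (p g k : Int) (hp : 3 ≤ p) (hk : 0 ≤ k) (hkN : k < pvN p) :
    pvTraj p g k 0 = k := by
  have hN := pvN_facts p hp
  unfold pvTraj
  rw [pow_zero, one_mul, pvU_id p (k + 1) (by omega) (by omega)]
  omega

theorem pvNoZero (p g k : Int) (hp : 3 ≤ p) (hg : Int.gcd g p = 1) (hk : 0 ≤ k)
    (hkN : k < pvN p) (l : Nat) : ¬ p ∣ g ^ l * (k + 1) := by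
  have hN := pvN_facts p hp
  intro hd
  have h1 := pvCancelPow p g (k + 1) l hg hd
  have h2 := Int.eq_zero_of_abs_lt_dvd h1 (by rw [abs_lt]; omega)
  omega

theorem pvTraj_range (p g k : Int) (hp : 3 ≤ p) (hg : Int.gcd g p = 1) (hk : 0 ≤ k)
    (hkN : k < pvN p) (l : Nat) : 0 ≤ pvTraj p g k l ∧ pvTraj p g k l < pvN p := by
  have hN := pvN_facts p hp
  have hnz := pvNoZero p g k hp hg hk hkN l
  have hb := pvU_bounds p (g ^ l * (k + 1)) (by omega) hnz
  have hstrict : 2 * pvU p (g ^ l * (k + 1)) ≠ p := by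
    intro he
    have hdm := pvDvdSubEmod p (g ^ l * (k + 1))
    have h1 : 0 ≤ g ^ l * (k + 1) % p := Int.emod_nonneg _ (by omega)
    have h2 : g ^ l * (k + 1) % p < p := Int.emod_lt_of_pos _ (by omega)
    have hr : 2 * (g ^ l * (k + 1) % p) = p := by unfold pvU at he; omega
    have hd2 : p ∣ 2 * (g ^ l * (k + 1)) := by
      have he2 : 2 * (g ^ l * (k + 1)) =
          2 * (g ^ l * (k + 1) - g ^ l * (k + 1) % p) + 2 * (g ^ l * (k + 1) % p) := by ring
      rw [he2]
      exact dvd_add (Dvd.dvd.mul_left hdm 2) ⟨1, by omega⟩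
    have h3 : p ∣ 2 * (k + 1) := by
      refine pvCancelPow p g (2 * (k + 1)) l hg ?_
      have he3 : g ^ l * (2 * (k + 1)) = 2 * (g ^ l * (k + 1)) := by ring
      rw [he3]; exact hd2
    have h4 := Int.eq_zero_of_abs_lt_dvd h3 (by rw [abs_lt]; omega)
    omega
  unfold pvTraj
  omega

theorem pvTraj_step (p g k : Int) (hp : 3 ≤ p) (hg : Int.gcd g p = 1) (hk : 0 ≤ k)
    (hkN : k < pvN p) (l : Nat) : pvF p g (pvTraj p g k l) = pvTraj p g k (l + 1) := by
  have hnz := pvNoZero p g k hp hg hk hkN l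
  have hb := pvU_bounds p (g ^ l * (k + 1)) (by omega) hnz
  unfold pvF pvTraj
  have e1 : pvU p (g ^ l * (k + 1)) - 1 + 1 = pvU p (g ^ l * (k + 1)) := by ring
  rw [e1]
  have e2 : g ^ (l + 1) * (k + 1) = g * (g ^ l * (k + 1)) := by ring
  rw [e2]
  congr 1
  have hnz2 : ¬ p ∣ g * pvU p (g ^ l * (k + 1)) := by
    intro hd
    have h1 := pvCancel p g _ hg hd
    have h2 := Int.eq_zero_of_abs_lt_dvd h1 (by rw [abs_lt]; omega)
    omega
  refine pvU_congr p _ _ (by omega) hnz2 ?_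
  have hdm := pvDvdSubEmod p (g ^ l * (k + 1))
  have hcase : pvU p (g ^ l * (k + 1)) = g ^ l * (k + 1) % p ∨
      pvU p (g ^ l * (k + 1)) = p - g ^ l * (k + 1) % p := by unfold pvU; omega
  rcases hcase with hc | hc
  · left
    have he : g * pvU p (g ^ l * (k + 1)) - g * (g ^ l * (k + 1)) =
        -(g * (g ^ l * (k + 1) - g ^ l * (k + 1) % p)) := by rw [hc]; ring
    rw [he]
    exact (Dvd.dvd.mul_left hdm g).neg_right
  · right
    have he : g * pvU p (g ^ l * (k + 1)) + g * (g ^ l * (k + 1)) =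
        g * (g ^ l * (k + 1) - g ^ l * (k + 1) % p) + p * g := by rw [hc]; ring
    rw [he]
    exact dvd_add (Dvd.dvd.mul_left hdm g) ⟨g, rfl⟩

-- the period condition: g^l ≡ ±1 (mod p)
def pvP (p g : Int) (l : Nat) : Prop := p ∣ g ^ l - 1 ∨ p ∣ g ^ l + 1


theorem pvP_traj (p g k : Int) (hp : 3 ≤ p) (hk : 0 ≤ k) (hkN : k < pvN p) (l : Nat)
    (hP : pvP p g l) : pvTraj p g k l = k := by
  have hN := pvN_facts p hp
  have hnz1 : ¬ p ∣ (k + 1) := by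
    intro hd
    have := Int.eq_zero_of_abs_lt_dvd hd (by rw [abs_lt]; omega)
    omega
  have hcong : pvU p (g ^ l * (k + 1)) = pvU p (k + 1) := by
    have hnzm : ¬ p ∣ g ^ l * (k + 1) := by
      intro hd
      rcases hP with h | h
      · exact hnz1 (by
          have := dvd_sub hd (Dvd.dvd.mul_right h (k + 1))
          have he : g ^ l * (k + 1) - (g ^ l - 1) * (k + 1) = k + 1 := by ring
          rwa [he] at this)
      · exact hnz1 (by
          have := dvd_sub (Dvd.dvd.mul_right h (k + 1)) hd
          have he : (g ^ l + 1) * (k + 1) - g ^ l * (k + 1) = k + 1 := by ring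
          rwa [he] at this)
    refine pvU_congr p _ _ (by omega) hnzm ?_
    rcases hP with h | h
    · left
      have he : g ^ l * (k + 1) - (k + 1) = (g ^ l - 1) * (k + 1) := by ring
      rw [he]; exact Dvd.dvd.mul_right h (k + 1)
    · right
      have he : g ^ l * (k + 1) + (k + 1) = (g ^ l + 1) * (k + 1) := by ring
      rw [he]; exact Dvd.dvd.mul_right h (k + 1)
  unfold pvTraj
  rw [hcong, pvU_id p (k + 1) (by omega) (by omega)]
  omega

theorem pvP_sub (p g : Int) (hg : Int.gcd g p = 1) (i j : Nat) (hij : i ≤ j)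
    (h : p ∣ g ^ i - g ^ j ∨ p ∣ g ^ i + g ^ j) : pvP p g (j - i) := by
  have he : g ^ j = g ^ i * g ^ (j - i) := by
    rw [← pow_add]
    congr 1
    omega
  rcases h with h | h
  · left
    have h1 : p ∣ 1 - g ^ (j - i) := by
      refine pvCancelPow p g (1 - g ^ (j - i)) i hg ?_
      have he2 : g ^ i * (1 - g ^ (j - i)) = g ^ i - g ^ j := by rw [he]; ring
      rw [he2]; exact h
    have h2 := h1.neg_right
    simpa using h2
  · right
    have h1 : p ∣ 1 + g ^ (j - i) := by
      refine pvCancelPow p g (1 + g ^ (j - i)) i hg ?_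
      have he2 : g ^ i * (1 + g ^ (j - i)) = g ^ i + g ^ j := by rw [he]; ring
      rw [he2]; exact h
    simpa [add_comm] using h1


theorem pvTrajInj_aux (p g : Int) (hp : 3 ≤ p) (hg : Int.gcd g p = 1) (l0 : Nat)
    (hmin : ∀ j, 0 < j → j < l0 → ¬ pvP p g j) (i j : Nat) (hij : i ≤ j) (hj : j < l0)
    (h : pvTraj p g 0 i = pvTraj p g 0 j) : i = j := by
  have hN := pvN_facts p hp
  have hu : pvU p (g ^ i * (0 + 1)) = pvU p (g ^ j * (0 + 1)) := by
    unfold pvTraj at h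
    omega
  have hnzi := pvNoZero p g 0 hp hg le_rfl (by omega) i
  have hnzj := pvNoZero p g 0 hp hg le_rfl (by omega) j
  have hd := pvU_eq_imp p _ _ (by omega) hnzi hnzj hu
  simp only [zero_add, mul_one] at hd
  have hP := pvP_sub p g hg i j hij hd
  by_contra hne
  exact hmin (j - i) (by omega) (by omega) hP

theorem pvTrajInj (p g : Int) (hp : 3 ≤ p) (hg : Int.gcd g p = 1) (l0 : Nat)
    (hmin : ∀ j, 0 < j → j < l0 → ¬ pvP p g j) (i j : Nat) (hi : i < l0) (hj : j < l0)
    (h : pvTraj p g 0 i = pvTraj p g 0 j) : i = j := by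
  rcases le_total i j with hij | hij
  · exact pvTrajInj_aux p g hp hg l0 hmin i j hij hj h
  · exact (pvTrajInj_aux p g hp hg l0 hmin j i hij hi h.symm).symm

theorem pvL0_le_N (p g : Int) (hp : 3 ≤ p) (hg : Int.gcd g p = 1) (l0 : Nat)
    (hmin : ∀ j, 0 < j → j < l0 → ¬ pvP p g j) : l0 ≤ (pvN p).toNat := by
  have hN := pvN_facts p hp
  have hcard := Finset.card_le_card_of_injOn (f := fun t : Nat => pvTraj p g 0 t)
    (s := Finset.range l0) (t := Finset.Ico (0 : Int) (pvN p))
    (by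
      intro t ht
      have ht' : t < l0 := Finset.mem_range.mp ht
      exact Finset.mem_Ico.mpr (pvTraj_range p g 0 hp hg le_rfl (by omega) t))
    (by
      intro i hi j hj hij
      have hi' : i < l0 := Finset.mem_range.mp (Finset.mem_coe.mp hi)
      have hj' : j < l0 := Finset.mem_range.mp (Finset.mem_coe.mp hj)
      exact pvTrajInj p g hp hg l0 hmin i j hi' hj' hij)
  rw [Finset.card_range, Int.card_Ico] at hcard
  omega

theorem pvP_exists (p g : Int) (hp : 3 ≤ p) (hg0 : 0 ≤ g) (hg : Int.gcd g p = 1) :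
    ∃ l : Nat, (0 < l ∧ l ≤ p.toNat) ∧ pvP p g l := by
  have hpt : 0 < p.toNat := by omega
  have ht : 0 < Nat.totient p.toNat := Nat.totient_pos.mpr hpt
  have htle : Nat.totient p.toNat ≤ p.toNat := Nat.totient_le _
  have hcop : Nat.Coprime g.toNat p.toNat := by
    unfold Nat.Coprime
    have hdef : Int.gcd g p = Nat.gcd g.natAbs p.natAbs := rfl
    rw [hdef] at hg
    have e1 : g.natAbs = g.toNat := by omega
    have e2 : p.natAbs = p.toNat := by omega
    rwa [e1, e2] at hg
  have heuler : g.toNat ^ Nat.totient p.toNat ≡ 1 [MOD p.toNat] :=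
    Nat.ModEq.pow_totient hcop
  have hdvd := heuler.dvd
  refine ⟨Nat.totient p.toNat, ⟨ht, htle⟩, Or.inl ?_⟩
  have hd2 : (p : Int) ∣ (1 : Int) - (g : Int) ^ Nat.totient p.toNat := by
    have hc1 : ((p.toNat : Nat) : Int) = p := by omega
    have hc2 : ((g.toNat : Nat) : Int) = g := by omega
    push_cast at hdvd
    rwa [hc1, hc2] at hdvd
  have := hd2.neg_right
  simpa using this

theorem pvEmod_eq_one_iff (p a : Int) (hp : 3 ≤ p) : a % p = 1 ↔ p ∣ a - 1 := by
  constructor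
  · intro h
    have := pvDvdSubEmod p a
    rwa [h] at this
  · intro h
    exact pvEmodEq p a 1 h (by omega) (by omega)

theorem pvEmod_eq_pm1_iff (p a : Int) (hp : 3 ≤ p) : a % p = p - 1 ↔ p ∣ a + 1 := by
  constructor
  · intro h
    have h1 := pvDvdSubEmod p a
    rw [h] at h1
    have := dvd_add h1 (dvd_refl p)
    have he : a - (p - 1) + p = a + 1 := by ring
    rwa [he] at this
  · intro h
    refine pvEmodEq p a (p - 1) ?_ (by omega) (by omega)
    have := dvd_sub h (dvd_refl p)
    have he : a + 1 - p = a - (p - 1) := by ring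
    rwa [he] at this

theorem pvOrderLoop_eq (p g : Int) (hp : 3 ≤ p) (l0 : Nat)
    (hP : pvP p g l0) (hmin : ∀ j, 0 < j → j < l0 → ¬ pvP p g j) :
    ∀ fuel i, 1 ≤ i → i ≤ l0 → l0 ≤ i + fuel →
      pvOrderLoop p g fuel (g ^ i % p) (i : Int) = (l0 : Int) := by
  intro fuel
  induction fuel with
  | zero =>
    intro i h1 h2 h3
    have : i = l0 := by omega
    unfold pvOrderLoop
    rw [this]
  | succ fu ih =>
    intro i h1 h2 h3
    by_cases hPi : pvP p g i
    · have hi : i = l0 := by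
        by_contra hne
        exact hmin i (by omega) (by omega) hPi
      have hcond : ¬ (g ^ i % p ≠ 1 ∧ g ^ i % p ≠ p - 1) := by
        rcases hPi with h | h
        · intro hc; exact hc.1 ((pvEmod_eq_one_iff p _ hp).mpr h)
        · intro hc; exact hc.2 ((pvEmod_eq_pm1_iff p _ hp).mpr h)
      unfold pvOrderLoop
      rw [if_neg hcond, hi]
    · have hcond : (g ^ i % p ≠ 1 ∧ g ^ i % p ≠ p - 1) := by
        constructor
        · intro hc; exact hPi (Or.inl ((pvEmod_eq_one_iff p _ hp).mp hc))
        · intro hc; exact hPi (Or.inr ((pvEmod_eq_pm1_iff p _ hp).mp hc))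
      have hil : i ≠ l0 := by
        intro he; rw [he] at hPi; exact hPi hP
      have hstep : PySem.Int.mod (g ^ i % p * g) p = g ^ (i + 1) % p := by
        rw [PySem.Int.mod_eq_emod_of_pos (by omega)]
        conv_rhs => rw [pow_succ]
        rw [Int.mul_emod, Int.emod_emod_of_dvd _ dvd_rfl, ← Int.mul_emod]
      unfold pvOrderLoop
      rw [if_pos hcond, hstep]
      have hrec := ih (i + 1) (by omega) (by omega) (by omega)
      have hc : (((i + 1 : Nat)) : Int) = (i : Int) + 1 := by push_cast; ring
      rwa [hc] at hrec


theorem pvWalk_le (p g : Int) (perm : PySem.Dict Int Int) (hp : 3 ≤ p) (hg : Int.gcd g p = 1)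
    (hperm : ∀ x : Int, 0 ≤ x → x < pvN p → perm.getD x 0 = pvF p g x)
    (k : Int) (hk : 0 ≤ k) (hkN : k < pvN p) (l0 : Nat) (hP : pvP p g l0) :
    ∀ (fuel j : Nat) (visited : PySem.Set Int) (orbit : List Int), j ≤ l0 → l0 - j < fuel →
      k ∈ visited →
      (pvWalk perm fuel (pvTraj p g k j) visited orbit).2.length ≤ orbit.length + (l0 - j) := by
  intro fuel
  induction fuel with
  | zero => intro j v o h1 h2 h3; omega
  | succ fu ih =>
    intro j v o h1 h2 h3
    by_cases hc : PySem.Set.contains v (pvTraj p g k j) = true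
    · unfold pvWalk
      rw [if_pos hc]
      simp
    · have hj : j ≠ l0 := by
        intro he
        rw [he, pvP_traj p g k hp hk hkN l0 hP] at hc
        exact hc ((PySem.Set.contains_iff _ _).mpr h3)
      have hrange := pvTraj_range p g k hp hg hk hkN j
      unfold pvWalk
      rw [if_neg hc, hperm _ hrange.1 hrange.2, pvTraj_step p g k hp hg hk hkN j]
      have hrec := ih (j + 1) (PySem.Set.add v (pvTraj p g k j)) (o ++ [pvTraj p g k j])
        (by omega) (by omega) ((PySem.Set.mem_add _ _ _).mpr (Or.inl h3))
      rw [List.length_append] at hrec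
      simp only [List.length_cons, List.length_nil] at hrec
      omega

theorem pvWalk_first (p g : Int) (perm : PySem.Dict Int Int) (hp : 3 ≤ p) (hg : Int.gcd g p = 1)
    (hperm : ∀ x : Int, 0 ≤ x → x < pvN p → perm.getD x 0 = pvF p g x)
    (l0 : Nat) (h0 : 0 < l0) (hP : pvP p g l0) (hmin : ∀ j, 0 < j → j < l0 → ¬ pvP p g j) :
    ∀ (fuel j : Nat) (visited : PySem.Set Int) (orbit : List Int), j ≤ l0 → l0 - j < fuel →
      (∀ x : Int, x ∈ visited ↔ ∃ i : Nat, i < j ∧ x = pvTraj p g 0 i) → orbit.length = j →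
      (pvWalk perm fuel (pvTraj p g 0 j) visited orbit).2.length = l0 := by
  have hN := pvN_facts p hp
  intro fuel
  induction fuel with
  | zero => intro j v o h1 h2 h3 h4; omega
  | succ fu ih =>
    intro j v o h1 h2 hv ho
    by_cases hc : PySem.Set.contains v (pvTraj p g 0 j) = true
    · have hmem := (PySem.Set.contains_iff _ _).mp hc
      obtain ⟨i, hi, hie⟩ := (hv _).mp hmem
      have hj : j = l0 := by
        by_contra hne
        have := pvTrajInj p g hp hg l0 hmin j i (by omega) (by omega) hie
        omega
      unfold pvWalk
      rw [if_pos hc]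
      show o.length = l0
      omega
    · have hj : j ≠ l0 := by
        intro he
        have he0 : pvTraj p g 0 l0 = pvTraj p g 0 0 := by
          rw [pvP_traj p g 0 hp le_rfl (by omega) l0 hP,
              pvTraj_zero p g 0 hp le_rfl (by omega)]
        have : pvTraj p g 0 j ∈ v := by
          rw [he, he0]
          exact (hv _).mpr ⟨0, by omega, rfl⟩
        exact hc ((PySem.Set.contains_iff _ _).mpr this)
      have hrange := pvTraj_range p g 0 hp hg le_rfl (by omega) j
      unfold pvWalk
      rw [if_neg hc, hperm _ hrange.1 hrange.2, pvTraj_step p g 0 hp hg le_rfl (by omega) j]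
      refine ih (j + 1) _ _ (by omega) (by omega) ?_ ?_
      · intro x
        rw [PySem.Set.mem_add, hv x]
        constructor
        · rintro (⟨i, hi, hie⟩ | he)
          · exact ⟨i, by omega, hie⟩
          · exact ⟨j, by omega, he⟩
        · rintro ⟨i, hi, hie⟩
          by_cases hij : i = j
          · right; rw [hie, hij]
          · left; exact ⟨i, by omega, hie⟩
      · rw [List.length_append]
        simp only [List.length_cons, List.length_nil]
        omega


theorem pvUnsignedDir_eq (p d : Int) (hp : 3 ≤ p) :
    pvUnsignedDir p (PySem.Int.mod d p) =
      if d % p = 0 then none else some (pvU p d - 1) := by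
  unfold pvUnsignedDir pvU
  rw [PySem.Int.mod_eq_emod_of_pos (by omega), PySem.Int.mod_eq_emod_of_pos (by omega),
      Int.emod_emod_of_dvd _ dvd_rfl]

theorem pvBuildPerm_none (p g : Int) (hp : 3 ≤ p) :
    ∀ (ks : List Int) (d : PySem.Dict Int Int), (∃ k ∈ ks, p ∣ g * (k + 1)) →
      pvBuildPerm p g ks d = none := by
  intro ks
  induction ks with
  | nil => rintro d ⟨k, hk, _⟩; cases hk
  | cons k ks ih =>
    rintro d ⟨k', hk', hdvd⟩
    by_cases hz : g * (k + 1) % p = 0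
    · simp [pvBuildPerm, pvUnsignedDir_eq p _ hp, hz]
    · have hk'' : k' ∈ ks := by
        rcases List.mem_cons.mp hk' with rfl | h
        · exact absurd (Int.emod_eq_zero_of_dvd hdvd) hz
        · exact h
      simp only [pvBuildPerm, pvUnsignedDir_eq p _ hp, if_neg hz]
      exact ih _ ⟨k', hk'', hdvd⟩

theorem pvBuildPerm_some (p g : Int) (hp : 3 ≤ p) :
    ∀ (ks : List Int) (d : PySem.Dict Int Int), (∀ k ∈ ks, ¬ p ∣ g * (k + 1)) → ks.Nodup →
      (∀ k ∈ ks, d.contains k = false) →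
      ∃ d', pvBuildPerm p g ks d = some d' ∧
        d'.items = d.items ++ ks.map (fun k => (k, pvF p g k)) := by
  intro ks
  induction ks with
  | nil => intro d _ _ _; exact ⟨d, rfl, by simp⟩
  | cons k ks ih =>
    intro d hz hnd hfresh
    have hz0 : ¬ p ∣ g * (k + 1) := hz k (List.mem_cons_self)
    have hmodne : ¬ g * (k + 1) % p = 0 := fun h => hz0 (Int.dvd_of_emod_eq_zero h)
    obtain ⟨d', hd', hitems⟩ := ih (d.insert k (pvU p (g * (k + 1)) - 1))
      (fun k' hk' => hz k' (List.mem_cons_of_mem _ hk'))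
      (List.nodup_cons.mp hnd).2
      (fun k' hk' => by
        rw [PySem.Dict.contains_insert]
        have hne : k' ≠ k := by rintro rfl; exact (List.nodup_cons.mp hnd).1 hk'
        simp [hne, hfresh k' (List.mem_cons_of_mem _ hk')])
    refine ⟨d', ?_, ?_⟩
    · simp only [pvBuildPerm, pvUnsignedDir_eq p _ hp, if_neg hmodne]
      exact hd'
    · rw [hitems, PySem.Dict.items_insert_of_not_contains _ _ (hfresh k List.mem_cons_self)]
      simp [pvF]

theorem pvTraj_one (p g k : Int) : pvTraj p g k 1 = pvF p g k := by
  unfold pvTraj pvF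
  rw [pow_one]

theorem pvOrbitsLoop_prefix (perm : PySem.Dict Int Int) (fuel : Nat) :
    ∀ (ks : List Int) (visited : PySem.Set Int) (orbits : List (List Int)),
      ∃ ex, pvOrbitsLoop perm fuel ks visited orbits = orbits ++ ex := by
  intro ks
  induction ks with
  | nil => intro v o; exact ⟨[], by simp [pvOrbitsLoop]⟩
  | cons k ks ih =>
    intro v o
    by_cases hc : PySem.Set.contains v k = true
    · obtain ⟨ex, he⟩ := ih v o
      exact ⟨ex, by simp only [pvOrbitsLoop, if_pos hc]; exact he⟩
    · obtain ⟨ex, he⟩ := ih (pvWalk perm fuel k v []).1 (o ++ [(pvWalk perm fuel k v []).2])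
      refine ⟨[(pvWalk perm fuel k v []).2] ++ ex, ?_⟩
      simp only [pvOrbitsLoop, if_neg hc]
      rw [he, List.append_assoc]

theorem pvOrbitsLoop_bound (p g : Int) (perm : PySem.Dict Int Int) (hp : 3 ≤ p)
    (hg : Int.gcd g p = 1)
    (hperm : ∀ x : Int, 0 ≤ x → x < pvN p → perm.getD x 0 = pvF p g x)
    (l0 : Nat) (h0 : 0 < l0) (hP : pvP p g l0) (hl0N : l0 ≤ (pvN p).toNat) :
    ∀ (ks : List Int) (visited : PySem.Set Int) (orbits : List (List Int)),
      (∀ k ∈ ks, 0 ≤ k ∧ k < pvN p) →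
      ∀ o ∈ pvOrbitsLoop perm ((pvN p).toNat + 2) ks visited orbits,
        o ∈ orbits ∨ o.length ≤ l0 := by
  intro ks
  induction ks with
  | nil => intro v os _ o ho; exact Or.inl (by simpa [pvOrbitsLoop] using ho)
  | cons k ks ih =>
    intro v os hks o ho
    have hk := hks k List.mem_cons_self
    by_cases hc : PySem.Set.contains v k = true
    · simp only [pvOrbitsLoop, if_pos hc] at ho
      exact ih v os (fun k' hk' => hks k' (List.mem_cons_of_mem _ hk')) o ho
    · simp only [pvOrbitsLoop, if_neg hc] at ho
      -- first step of the walk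
      have hw : pvWalk perm ((pvN p).toNat + 2) k v [] =
          pvWalk perm ((pvN p).toNat + 1) (perm.getD k 0) (PySem.Set.add v k) ([] ++ [k]) := by
        show pvWalk perm (((pvN p).toNat + 1) + 1) k v [] = _
        rw [pvWalk, if_neg hc]
      have hlen : (pvWalk perm ((pvN p).toNat + 2) k v []).2.length ≤ l0 := by
        rw [hw, hperm k hk.1 hk.2, ← pvTraj_one p g k]
        have := pvWalk_le p g perm hp hg hperm k hk.1 hk.2 l0 hP
          ((pvN p).toNat + 1) 1 (PySem.Set.add v k) ([] ++ [k]) (by omega) (by omega)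
          ((PySem.Set.mem_add _ _ _).mpr (Or.inr rfl))
        simp only [List.length_append, List.length_cons, List.length_nil] at this
        omega
      have := ih _ _ (fun k' hk' => hks k' (List.mem_cons_of_mem _ hk')) o ho
      rcases this with hmem | hle
      · rcases List.mem_append.mp hmem with h | h
        · exact Or.inl h
        · right
          rw [List.mem_singleton.mp h]
          exact hlen
      · exact Or.inr hle


theorem pvF_inj (p g x y : Int) (hp : 3 ≤ p) (hg : Int.gcd g p = 1) (hx : 0 ≤ x)
    (hxN : x < pvN p) (hy : 0 ≤ y) (hyN : y < pvN p) (h : pvF p g x = pvF p g y) : x = y := by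
  have hN := pvN_facts p hp
  have hnzx : ¬ p ∣ g * (x + 1) := by
    have := pvNoZero p g x hp hg hx hxN 1
    rwa [pow_one] at this
  have hnzy : ¬ p ∣ g * (y + 1) := by
    have := pvNoZero p g y hp hg hy hyN 1
    rwa [pow_one] at this
  have hu : pvU p (g * (x + 1)) = pvU p (g * (y + 1)) := by unfold pvF at h; omega
  rcases pvU_eq_imp p _ _ (by omega) hnzx hnzy hu with hd | hd
  · have he : g * (x + 1) - g * (y + 1) = g * (x - y) := by ring
    rw [he] at hd
    have h1 := pvCancel p g _ hg hd
    have := Int.eq_zero_of_abs_lt_dvd h1 (by rw [abs_lt]; omega)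
    omega
  · have he : g * (x + 1) + g * (y + 1) = g * (x + y + 2) := by ring
    rw [he] at hd
    have h1 := pvCancel p g _ hg hd
    have := Int.eq_zero_of_abs_lt_dvd h1 (by rw [abs_lt]; omega)
    omega

theorem pvOfList_length_lt (l : List Int) (h : ¬ l.Nodup) :
    (PySem.Set.ofList l).length < l.length := by
  have hperm : (PySem.Set.ofList l).Perm l.dedup :=
    (List.perm_ext_iff_of_nodup (PySem.Set.nodup_ofList l) l.nodup_dedup).mpr
      (fun a => by rw [PySem.Set.mem_ofList, List.mem_dedup])
  rw [hperm.length_eq]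
  rcases Nat.lt_or_ge l.dedup.length l.length with hlt | hge
  · exact hlt
  · exfalso
    have hsub := l.dedup_sublist
    have hlen : l.dedup.length = l.length := le_antisymm hsub.length_le hge
    exact h (List.dedup_eq_self.mp (hsub.eq_of_length hlen))

theorem pvGcdLoop_eq : ∀ (fuel a b : Nat), b < fuel → pvGcdLoop fuel a b = Nat.gcd b a := by
  intro fuel
  induction fuel with
  | zero => intro a b h; omega
  | succ fu ih =>
    intro a b h
    by_cases hb : b = 0
    · subst hb
      simp [pvGcdLoop]
    · unfold pvGcdLoop
      rw [if_neg hb, ih b (a % b) (by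
        have := Nat.mod_lt a (y := b) (by omega)
        omega)]
      rw [Nat.gcd_rec b a]

theorem pvGcd_toNat (p g : Int) (hp : 3 ≤ p) (hg2 : 2 ≤ g) :
    pvGcdLoop (p.toNat + 1) g.toNat p.toNat = Int.gcd g p := by
  rw [pvGcdLoop_eq _ _ _ (by omega), Nat.gcd_comm]
  have e1 : g.toNat = g.natAbs := by omega
  have e2 : p.toNat = p.natAbs := by omega
  rw [e1, e2]
  rfl

theorem pvPerG_good (p g : Int) (hp : 3 ≤ p) (hg2 : 2 ≤ g)
    (hg : Int.gcd g p = 1) :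
    ∃ perm orbits, compute_dir_perm p g =
        (some perm, orbits, orbits.map (fun o => ((o.length : Int)))) ∧
      PySem.List.max? (orbits.map (fun o => ((o.length : Int)))) (fun x => x) =
        some (pvOrderLoop p g (p.toNat + 1) (PySem.Int.mod g p) 1) := by
  have hN := pvN_facts p hp
  -- the minimal period l0
  have hdec : DecidablePred (fun l : Nat => 0 < l ∧ pvP p g l) := by
    intro l; unfold pvP; infer_instance
  obtain ⟨t, ⟨ht0, htle⟩, htP⟩ := pvP_exists p g hp (by omega) hg
  have hexQ : ∃ l : Nat, 0 < l ∧ pvP p g l := ⟨t, ht0, htP⟩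
  set l0 := Nat.find hexQ with hl0def
  have h0 : 0 < l0 := (Nat.find_spec hexQ).1
  have hP : pvP p g l0 := (Nat.find_spec hexQ).2
  have hmin : ∀ j, 0 < j → j < l0 → ¬ pvP p g j := by
    intro j hj0 hjl hPj
    exact Nat.find_min hexQ hjl ⟨hj0, hPj⟩
  have hl0p : l0 ≤ p.toNat := le_trans (Nat.find_min' hexQ ⟨ht0, htP⟩) htle
  have hl0N : l0 ≤ (pvN p).toNat := pvL0_le_N p g hp hg l0 hmin
  -- build the permutation dict
  have hz : ∀ k ∈ PySem.List.pyRange 0 (pvN p) 1, ¬ p ∣ g * (k + 1) := by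
    intro k hk
    have hb := PySem.List.mem_pyRange_one.mp hk
    have := pvNoZero p g k hp hg hb.1 hb.2 1
    rwa [pow_one] at this
  obtain ⟨perm, hbuild, hitems⟩ := pvBuildPerm_some p g hp (PySem.List.pyRange 0 (pvN p) 1)
    PySem.Dict.empty hz (PySem.List.nodup_pyRange_one 0 (pvN p)) (fun k _ => rfl)
  have hitems' : perm.items = (PySem.List.pyRange 0 (pvN p) 1).map (fun k => (k, pvF p g k)) := by
    rw [hitems]; rfl
  have hkeys : perm.keys = PySem.List.pyRange 0 (pvN p) 1 := by
    show perm.items.map (·.1) = _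
    rw [hitems']
    simp [Function.comp_def]
  have hkeysnd : perm.keys.Nodup := by rw [hkeys]; exact PySem.List.nodup_pyRange_one 0 (pvN p)
  have hperm : ∀ x : Int, 0 ≤ x → x < pvN p → perm.getD x 0 = pvF p g x := by
    intro x h1 h2
    refine PySem.Dict.getD_of_mem_items perm ?_ hkeysnd 0
    rw [hitems']
    exact List.mem_map.mpr ⟨x, PySem.List.mem_pyRange_one.mpr ⟨h1, h2⟩, rfl⟩
  have hvalues : perm.values = (PySem.List.pyRange 0 (pvN p) 1).map (pvF p g) := by
    show perm.items.map (·.2) = _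
    rw [hitems']
    simp [Function.comp_def]
  have hvnodup : perm.values.Nodup := by
    rw [hvalues]
    refine List.Nodup.map_on ?_ (PySem.List.nodup_pyRange_one 0 (pvN p))
    intro x hx y hy hxy
    have hbx := PySem.List.mem_pyRange_one.mp hx
    have hby := PySem.List.mem_pyRange_one.mp hy
    exact pvF_inj p g x y hp hg hbx.1 hbx.2 hby.1 hby.2 hxy
  have hvlen : ((PySem.Set.ofList perm.values).length : Int) = pvN p := by
    rw [PySem.Set.ofList_eq_self_of_nodup _ hvnodup, hvalues, List.length_map,
        PySem.List.length_pyRange_one]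
    omega
  -- the first walk has length exactly l0
  have hrange0 : PySem.List.pyRange 0 (pvN p) 1 = 0 :: PySem.List.pyRange 1 (pvN p) 1 :=
    PySem.List.pyRange_one_cons (by omega)
  have hwalk0 : (pvWalk perm ((pvN p).toNat + 2) 0 PySem.Set.empty []).2.length = l0 := by
    have ht0' : pvTraj p g 0 0 = 0 := pvTraj_zero p g 0 hp le_rfl (by omega)
    rw [← ht0']
    refine pvWalk_first p g perm hp hg hperm l0 h0 hP hmin ((pvN p).toNat + 2) 0
      PySem.Set.empty [] (by omega) (by omega) ?_ rfl
    intro x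
    constructor
    · intro hx; cases hx
    · rintro ⟨i, hi, _⟩; omega
  -- the orbit list
  set W := pvWalk perm ((pvN p).toNat + 2) 0 PySem.Set.empty [] with hW
  have hc0 : ¬ PySem.Set.contains PySem.Set.empty (0 : Int) = true := by
    intro h
    have := (PySem.Set.contains_iff _ _).mp h
    cases this
  have horbits : pvOrbitsLoop perm ((pvN p).toNat + 2) (PySem.List.pyRange 0 (pvN p) 1)
      PySem.Set.empty [] = pvOrbitsLoop perm ((pvN p).toNat + 2) (PySem.List.pyRange 1 (pvN p) 1)
      W.1 ([] ++ [W.2]) := by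
    rw [hrange0, pvOrbitsLoop, if_neg hc0]
  set R := pvOrbitsLoop perm ((pvN p).toNat + 2) (PySem.List.pyRange 1 (pvN p) 1) W.1 ([] ++ [W.2])
    with hR
  obtain ⟨ex, hex⟩ := pvOrbitsLoop_prefix perm ((pvN p).toNat + 2)
    (PySem.List.pyRange 1 (pvN p) 1) W.1 ([] ++ [W.2])
  have hbound : ∀ o ∈ R, o ∈ ([] ++ [W.2] : List (List Int)) ∨ o.length ≤ l0 := by
    intro o ho
    refine pvOrbitsLoop_bound p g perm hp hg hperm l0 h0 hP hl0N _ _ _ ?_ o ho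
    intro k hk
    have := PySem.List.mem_pyRange_one.mp hk
    omega
  -- the max of the orbit lengths is l0
  have hW2mem : W.2 ∈ R := by rw [hR, hex]; simp
  have hmax : PySem.List.max? (R.map (fun o => ((o.length : Int)))) (fun x => x) =
      some ((l0 : Int)) := by
    have hne : R.map (fun o => ((o.length : Int))) ≠ [] := by
      intro h
      rw [List.map_eq_nil_iff] at h
      rw [h] at hW2mem
      cases hW2mem
    rcases hm : PySem.List.max? (R.map (fun o => ((o.length : Int)))) (fun x => x) with _ | m
    · exact absurd ((PySem.List.max?_eq_none_iff _ _).mp hm) hne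
    · have hmem := PySem.List.max?_mem hm
      obtain ⟨o, ho, hoe⟩ := List.mem_map.mp hmem
      have hle1 : m ≤ (l0 : Int) := by
        rcases hbound o ho with h | h
        · simp only [List.nil_append, List.mem_singleton] at h
          rw [← hoe, h, hwalk0]
        · rw [← hoe]
          exact_mod_cast h
      have hle2 : (l0 : Int) ≤ m := by
        have hin : ((l0 : Int)) ∈ R.map (fun o => ((o.length : Int))) := by
          refine List.mem_map.mpr ⟨W.2, hW2mem, ?_⟩
          rw [hwalk0]
        exact PySem.List.max?_isMax hm _ hin
      have hme : m = (l0 : Int) := le_antisymm hle1 hle2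
      rw [← hme]
      exact hm
  -- the order loop computes l0 too
  have horder : pvOrderLoop p g (p.toNat + 1) (PySem.Int.mod g p) 1 = (l0 : Int) := by
    have he : PySem.Int.mod g p = g ^ 1 % p := by
      rw [PySem.Int.mod_eq_emod_of_pos (by omega), pow_one]
    rw [he]
    have := pvOrderLoop_eq p g hp l0 hP hmin (p.toNat + 1) 1 le_rfl (by omega) (by omega)
    simpa using this
  -- assemble
  refine ⟨perm, R, ?_, by rw [hmax, horder]⟩
  show (match pvBuildPerm p g (PySem.List.pyRange 0 (pvN p) 1) PySem.Dict.empty with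
    | none => (none, [], [])
    | some perm =>
      if ((PySem.Set.ofList perm.values).length : Int) ≠ pvN p then (none, [], [])
      else
        let orbits := pvOrbitsLoop perm ((pvN p).toNat + 2) (PySem.List.pyRange 0 (pvN p) 1)
          PySem.Set.empty []
        (some perm, orbits, orbits.map (fun o => ((o.length : Int))))) =
    (some perm, R, R.map (fun o => ((o.length : Int))))
  rw [hbuild]
  simp only [hvlen, ne_eq, not_true_eq_false, if_false]
  rw [horbits]


theorem pvPerG_bad (p g : Int) (hp : 3 ≤ p) (hp4 : p ≠ 4) (hg2 : 2 ≤ g)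
    (hg : Int.gcd g p ≠ 1) : compute_dir_perm p g = (none, [], []) := by
  have hN := pvN_facts p hp
  by_cases hex : ∃ k ∈ PySem.List.pyRange 0 (pvN p) 1, p ∣ g * (k + 1)
  · have hb := pvBuildPerm_none p g hp (PySem.List.pyRange 0 (pvN p) 1) PySem.Dict.empty hex
    show (match pvBuildPerm p g (PySem.List.pyRange 0 (pvN p) 1) PySem.Dict.empty with
      | none => ((none : Option (PySem.Dict Int Int)), ([] : List (List Int)), ([] : List Int))
      | some perm =>
        if ((PySem.Set.ofList perm.values).length : Int) ≠ pvN p then (none, [], [])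
        else
          let orbits := pvOrbitsLoop perm ((pvN p).toNat + 2) (PySem.List.pyRange 0 (pvN p) 1)
            PySem.Set.empty []
          (some perm, orbits, orbits.map (fun o => ((o.length : Int))))) = (none, [], [])
    rw [hb]
  · push Not at hex
    obtain ⟨perm, hbuild, hitems⟩ := pvBuildPerm_some p g hp (PySem.List.pyRange 0 (pvN p) 1)
      PySem.Dict.empty hex (PySem.List.nodup_pyRange_one 0 (pvN p)) (fun k _ => rfl)
    have hitems' : perm.items =
        (PySem.List.pyRange 0 (pvN p) 1).map (fun k => (k, pvF p g k)) := by rw [hitems]; rfl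
    have hvalues : perm.values = (PySem.List.pyRange 0 (pvN p) 1).map (pvF p g) := by
      show perm.items.map (·.2) = _
      rw [hitems']
      simp [Function.comp_def]
    -- gcd(g,p) = 2, p is even, and p/2 - 1 = n_dirs
    have hgcd0 : Int.gcd g p ≠ 0 := by
      intro h
      rw [Int.gcd_eq_zero_iff] at h
      omega
    have hdI2 : 2 ≤ (Int.gcd g p : Int) := by
      have h1 : 1 ≤ Int.gcd g p := by omega
      have h2 : Int.gcd g p ≠ 1 := hg
      omega
    have hdg : ((Int.gcd g p : Int)) ∣ g := Int.gcd_dvd_left g p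
    obtain ⟨m, hm⟩ := Int.gcd_dvd_right g p
    have hm1 : 1 ≤ m := by
      by_contra h
      push Not at h
      have := mul_nonpos_of_nonneg_of_nonpos (by omega : (0:Int) ≤ (Int.gcd g p : Int))
        (by omega : m ≤ 0)
      omega
    have hdvdgm : p ∣ g * m := by
      obtain ⟨a, ha⟩ := hdg
      exact ⟨a, by linear_combination m * ha - a * hm⟩
    have hmN : pvN p < m := by
      by_contra h
      push Not at h
      refine hex (m - 1) (PySem.List.mem_pyRange_one.mpr ⟨by omega, by omega⟩) ?_
      have he : m - 1 + 1 = m := by ring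
      rwa [he]
    have h2m : 2 * m ≤ p := by
      nlinarith [mul_nonneg (by omega : (0:Int) ≤ (Int.gcd g p : Int) - 2) (by omega : (0:Int) ≤ m)]
    have h2meq : 2 * m = p := by omega
    have h2Neq : 2 * pvN p = p - 2 := by omega
    have hp6 : 6 ≤ p := by omega
    -- the collision pvF 0 = pvF (m - 2)
    have hnz0 : ¬ p ∣ g * (0 + 1) :=
      hex 0 (PySem.List.mem_pyRange_one.mpr ⟨le_rfl, by omega⟩)
    have hcol : pvF p g 0 = pvF p g (m - 2) := by
      unfold pvF
      have hu : pvU p (g * (0 + 1)) = pvU p (g * (m - 2 + 1)) := by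
        refine pvU_congr p _ _ (by omega) hnz0 (Or.inr ?_)
        have he : g * (0 + 1) + g * (m - 2 + 1) = g * m := by ring
        rw [he]
        exact hdvdgm
      omega
    have hvnotnodup : ¬ perm.values.Nodup := by
      intro hnd
      rw [hvalues] at hnd
      have hinj := List.inj_on_of_nodup_map hnd
      have h00 : (0:Int) ∈ PySem.List.pyRange 0 (pvN p) 1 :=
        PySem.List.mem_pyRange_one.mpr ⟨le_rfl, by omega⟩
      have hm2 : (m - 2) ∈ PySem.List.pyRange 0 (pvN p) 1 :=
        PySem.List.mem_pyRange_one.mpr ⟨by omega, by omega⟩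
      have := hinj h00 hm2 hcol
      omega
    have hlen : ((PySem.Set.ofList perm.values).length : Int) ≠ pvN p := by
      have hlt := pvOfList_length_lt _ hvnotnodup
      have hv : perm.values.length = (pvN p).toNat := by
        rw [hvalues, List.length_map, PySem.List.length_pyRange_one]
        omega
      omega
    show (match pvBuildPerm p g (PySem.List.pyRange 0 (pvN p) 1) PySem.Dict.empty with
      | none => ((none : Option (PySem.Dict Int Int)), ([] : List (List Int)), ([] : List Int))
      | some perm =>
        if ((PySem.Set.ofList perm.values).length : Int) ≠ pvN p then (none, [], [])
        else
          let orbits := pvOrbitsLoop perm ((pvN p).toNat + 2) (PySem.List.pyRange 0 (pvN p) 1)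
            PySem.Set.empty []
          (some perm, orbits, orbits.map (fun o => ((o.length : Int))))) = (none, [], [])
    rw [hbuild]
    have hred : (match some perm with
      | none => ((none : Option (PySem.Dict Int Int)), ([] : List (List Int)), ([] : List Int))
      | some perm =>
        if ((PySem.Set.ofList perm.values).length : Int) ≠ pvN p then (none, [], [])
        else
          let orbits := pvOrbitsLoop perm ((pvN p).toNat + 2) (PySem.List.pyRange 0 (pvN p) 1)
            PySem.Set.empty []
          (some perm, orbits, orbits.map (fun o => ((o.length : Int))))) =
      (if ((PySem.Set.ofList perm.values).length : Int) ≠ pvN p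
        then ((none : Option (PySem.Dict Int Int)), ([] : List (List Int)), ([] : List Int))
        else
          let orbits := pvOrbitsLoop perm ((pvN p).toNat + 2) (PySem.List.pyRange 0 (pvN p) 1)
            PySem.Set.empty []
          (some perm, orbits, orbits.map (fun o => ((o.length : Int))))) := rfl
    rw [hred, if_pos hlen]

theorem pvLoop_eq (p : Int) (hp : 3 ≤ p) (hp4 : p ≠ 4) :
    ∀ (gs : List Int) (bg bm : Int), (∀ g ∈ gs, 2 ≤ g ∧ g < p) →
      pvALoop p (pvN p) gs bg bm = pvBLoop p (pvN p) gs bg bm := by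
  intro gs
  induction gs with
  | nil => intro bg bm _; rfl
  | cons g gs ih =>
    intro bg bm hgs
    have hgb := hgs g List.mem_cons_self
    have hrest : ∀ g' ∈ gs, 2 ≤ g' ∧ g' < p :=
      fun g' hg' => hgs g' (List.mem_cons_of_mem _ hg')
    by_cases hg : Int.gcd g p = 1
    · obtain ⟨perm, orbits, hcomp, hmax⟩ := pvPerG_good p g hp hgb.1 hg
      rw [pvALoop, hcomp, pvBLoop, pvGcd_toNat p g hp hgb.1, hg]
      rw [if_neg (show ¬((1:Nat) ≠ 1) from by simp)]
      simp only [hmax]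
      split_ifs with h1 h2
      · rfl
      · exact ih g _ hrest
      · exact ih bg bm hrest
    · have hcomp := pvPerG_bad p g hp hp4 hgb.1 hg
      rw [pvALoop, hcomp, pvBLoop, pvGcd_toNat p g hp hgb.1]
      rw [if_pos (by exact_mod_cast hg)]
      exact ih bg bm hrest

theorem find_best_generator_spec : Claim_equal_find_best_generator := by
  intro p _ hpre
  unfold Pre_find_best_generator at hpre
  unfold Spec_find_best_generator find_best_generator find_best_generator_alt
  by_cases hp : 3 ≤ p
  · refine pvLoop_eq p hp hpre (PySem.List.pyRange 2 p 1) 2 0 ?_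
    intro g hg
    exact PySem.List.mem_pyRange_one.mp hg
  · rw [PySem.List.pyRange_one_eq_nil (by omega)]
    rfl
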